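-- pv_equiv track=rewrite | github.com/rlawson8/FinalProject | it-4320-final-proj/flask_wtforms_tutorial/forms.py | create_reservation_code
-- ===== SOURCE A (Python) =====
-- def create_reservation_code(first_name, last_name, row, seat):
--     INFOTC4320 = "INFOTC4320"
--     if len(first_name) < len(INFOTC4320):
--         difference = len(INFOTC4320) - len(first_name)
--         for x in range(difference):
--             first_name += " "
--     elif len(first_name) > len(INFOTC4320):
--         difference = len(first_name) - len(INFOTC4320)
--         for x in range(difference):
--             INFOTC4320 += " "
--     reservation_code = ''.join([''.join(t) for t in zip(first_name, INFOTC4320)])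
--     reservation_code = reservation_code.replace(" ", "")
--     return reservation_code
-- ===== SOURCE B (Python) =====
-- def create_reservation_code(first_name, last_name, row, seat):
--     code = "INFOTC4320"
--     out = []
--     for i in range(max(len(first_name), len(code))):
--         if i < len(first_name) and first_name[i] != " ":
--             out.append(first_name[i])
--         if i < len(code):
--             out.append(code[i])
--     return "".join(out)
-- ===== Notes on version B (the rewrite author's own statement) =====
-- stated objective: simpler
-- what changed: Replaces the two space-padding branches, the zip of padded strings and the final replace(' ','') by a single index loop to max(len(first_name),10) that appends the name character (skipping spaces) and the constant character directly.
import Mathlib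
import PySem

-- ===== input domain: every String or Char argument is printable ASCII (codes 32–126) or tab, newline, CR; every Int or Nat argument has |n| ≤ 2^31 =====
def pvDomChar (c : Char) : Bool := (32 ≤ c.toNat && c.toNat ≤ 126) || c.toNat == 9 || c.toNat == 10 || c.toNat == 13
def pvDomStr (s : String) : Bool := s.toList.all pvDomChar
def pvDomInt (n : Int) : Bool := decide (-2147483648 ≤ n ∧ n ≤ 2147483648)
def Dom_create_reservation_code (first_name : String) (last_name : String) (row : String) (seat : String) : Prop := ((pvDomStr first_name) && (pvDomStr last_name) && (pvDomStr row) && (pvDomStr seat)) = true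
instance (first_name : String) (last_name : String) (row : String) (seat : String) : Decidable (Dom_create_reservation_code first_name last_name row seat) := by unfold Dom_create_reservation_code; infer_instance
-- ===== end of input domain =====

-- ===== PORT A =====
-- B interleaves name and constant by one index loop instead of padding + zip + replace (objective: simpler).
def create_reservation_code (first_name : String) (last_name : String) (row : String) (seat : String) : String :=
  let I0 : List Char := "INFOTC4320".toList
  let f0 : List Char := first_name.toList
  -- the two padding branches: 'for x in range(difference): s += " "'
  let p : List Char × List Char :=
    if f0.length < I0.length then
      ((PySem.List.pyRange 0 ((I0.length : Int) - (f0.length : Int)) 1).foldl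
        (fun acc _ => acc ++ [' ']) f0, I0)
    else if f0.length > I0.length then
      (f0, (PySem.List.pyRange 0 ((f0.length : Int) - (I0.length : Int)) 1).foldl
        (fun acc _ => acc ++ [' ']) I0)
    else (f0, I0)
  -- ''.join([''.join(t) for t in zip(first_name, INFOTC4320)])
  let reservation_code := PySem.Chars.join [] ((p.1.zip p.2).map (fun t => PySem.Chars.join [] [[t.1], [t.2]]))
  -- reservation_code.replace(" ", "")
  let reservation_code := PySem.Chars.replace reservation_code [' '] []
  String.mk reservation_code

-- ===== PORT B =====
def create_reservation_code_alt (first_name : String) (last_name : String) (row : String) (seat : String) : String :=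
  let code : List Char := "INFOTC4320".toList
  let f : List Char := first_name.toList
  let out : List Char :=
    (PySem.List.pyRange 0 (max (f.length : Int) (code.length : Int)) 1).foldl
      (fun acc i =>
        let acc := if i < (f.length : Int) ∧ PySem.List.pyGetD f i ' ' ≠ ' '
                   then acc ++ [PySem.List.pyGetD f i ' '] else acc
        if i < (code.length : Int) then acc ++ [PySem.List.pyGetD code i ' '] else acc)
      []
  String.mk (PySem.Chars.join [] (out.map (fun c => [c])))

-- ===== PRECONDITION & SPEC =====
def Spec_create_reservation_code (first_name : String) (last_name : String) (row : String) (seat : String) (out : String) : Prop := out = create_reservation_code_alt first_name last_name row seat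
instance (first_name : String) (last_name : String) (row : String) (seat : String) (out : String) : Decidable (Spec_create_reservation_code first_name last_name row seat out) := by unfold Spec_create_reservation_code; infer_instance

-- ===== CLAIM (what is proved, stated in full; the proofs are below) =====
def Claim_equal_create_reservation_code : Prop := ∀ (first_name : String) (last_name : String) (row : String) (seat : String), Dom_create_reservation_code first_name last_name row seat → Spec_create_reservation_code first_name last_name row seat (create_reservation_code first_name last_name row seat)

-- ===== LEMMAS AND PROOFS =====

-- the common interleaving both programs compute: name char (spaces dropped) then constant char, per position
def pvMixB : List Char → List Char → List Char
  | a :: f, b :: c => (if a = ' ' then [] else [a]) ++ b :: pvMixB f c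
  | a :: f, [] => (if a = ' ' then [] else [a]) ++ pvMixB f []
  | [], b :: c => b :: pvMixB [] c
  | [], [] => []

-- interleaving with spaces dropped from BOTH sides (A's zip-then-replace shape)
def pvMixF : List Char → List Char → List Char
  | a :: f, b :: c => (if a = ' ' then [] else [a]) ++ (if b = ' ' then [] else [b]) ++ pvMixF f c
  | _, _ => []

theorem pv_join_nil_flatten (l : List (List Char)) : PySem.Chars.join [] l = l.flatten := by
  induction l with
  | nil => rfl
  | cons x t ih =>
    cases t with
    | nil => simp [PySem.Chars.join, List.intercalate]
    | cons y u =>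
      simp [PySem.Chars.join, List.intercalate, List.intersperse] at ih ⊢
      simpa using ih

theorem pv_replace_go (fuel : Nat) : ∀ (l acc : List Char), l.length ≤ fuel →
    PySem.Chars.replace.go [' '] [] fuel l acc = acc.reverse ++ l.filter (fun x => x ≠ ' ') := by
  induction fuel with
  | zero =>
    intro l acc h
    have : l = [] := List.eq_nil_of_length_eq_zero (Nat.le_zero.mp h)
    subst this; simp [PySem.Chars.replace.go]
  | succ n ih =>
    intro l acc h
    cases l with
    | nil => simp [PySem.Chars.replace.go]
    | cons c t =>
      by_cases hc : c = ' '
      · subst hc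
        have : List.isPrefixOf [' '] (' ' :: t) = true := by simp [List.isPrefixOf]
        simp only [PySem.Chars.replace.go, this, if_pos]
        rw [ih] <;> simp_all
      · have hpre : List.isPrefixOf [' '] (c :: t) = false := by
          simp [List.isPrefixOf]; exact fun h' => hc h'.symm
        simp only [PySem.Chars.replace.go, hpre]
        rw [if_neg (by simp [hpre]), ih t (c :: acc) (by simpa using Nat.lt_succ_iff.mp (by simpa using h))]
        simp [hc]

theorem pv_replace_filter (l : List Char) :
    PySem.Chars.replace l [' '] [] = l.filter (fun x => x ≠ ' ') := by
  rw [PySem.Chars.replace, if_neg (by simp)]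
  simpa using pv_replace_go l.length l [] (le_refl _)

theorem pv_inter_filter : ∀ (f c : List Char),
    (((f.zip c).map (fun t => [t.1, t.2])).flatten).filter (fun x => x ≠ ' ') = pvMixF f c := by
  intro f
  induction f with
  | nil => intro c; simp [pvMixF]
  | cons a f ih =>
    intro c
    cases c with
    | nil => simp [pvMixF]
    | cons b c =>
      simp only [List.zip_cons_cons, List.map_cons, List.flatten_cons, List.filter_append,
        pvMixF, ih]
      by_cases ha : a = ' ' <;> by_cases hb : b = ' ' <;> simp [ha, hb, List.filter]

theorem pv_mixF_rep_right : ∀ (f : List Char),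
    pvMixF f (List.replicate f.length ' ') = pvMixB f [] := by
  intro f
  induction f with
  | nil => simp [pvMixF, pvMixB]
  | cons a f ih => simp [pvMixF, pvMixB, List.replicate, ih]

theorem pv_padR : ∀ (c f : List Char), c.length ≤ f.length → (∀ x ∈ c, x ≠ ' ') →
    pvMixF f (c ++ List.replicate (f.length - c.length) ' ') = pvMixB f c := by
  intro c
  induction c with
  | nil => intro f _ _; simpa using pv_mixF_rep_right f
  | cons b c ih =>
    intro f hle hs
    cases f with
    | nil => simp at hle
    | cons a f =>
      have hb : b ≠ ' ' := hs b (by simp)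
      simp only [List.length_cons, List.cons_append, pvMixF, pvMixB]
      rw [Nat.succ_sub_succ, ih f (by simpa using hle) (fun x hx => hs x (by simp [hx]))]
      simp [hb]

theorem pv_mixF_rep_left : ∀ (c : List Char), (∀ x ∈ c, x ≠ ' ') →
    pvMixF (List.replicate c.length ' ') c = pvMixB [] c := by
  intro c
  induction c with
  | nil => intro _; simp [pvMixF, pvMixB]
  | cons b c ih =>
    intro hs
    have hb : b ≠ ' ' := hs b (by simp)
    simp [pvMixF, pvMixB, List.replicate, ih (fun x hx => hs x (by simp [hx])), hb]

theorem pv_padL : ∀ (f c : List Char), f.length ≤ c.length → (∀ x ∈ c, x ≠ ' ') →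
    pvMixF (f ++ List.replicate (c.length - f.length) ' ') c = pvMixB f c := by
  intro f
  induction f with
  | nil => intro c _ hs; simpa using pv_mixF_rep_left c hs
  | cons a f ih =>
    intro c hle hs
    cases c with
    | nil => simp at hle
    | cons b c =>
      have hb : b ≠ ' ' := hs b (by simp)
      simp only [List.length_cons, List.cons_append, pvMixF, pvMixB]
      rw [Nat.succ_sub_succ, ih c (by simpa using hle) (fun x hx => hs x (by simp [hx]))]
      simp [hb]

-- B's index loop computes pvMixB
theorem pv_loopB : ∀ (n : Nat) (f c acc : List Char), n = max f.length c.length →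
    (List.range n).foldl
      (fun acc (k : Nat) =>
        let acc := if k < f.length ∧ f.getD k ' ' ≠ ' ' then acc ++ [f.getD k ' '] else acc
        if k < c.length then acc ++ [c.getD k ' '] else acc) acc
    = acc ++ pvMixB f c := by
  intro n
  induction n with
  | zero =>
    intro f c acc h
    have hf : f = [] := List.eq_nil_of_length_eq_zero (by omega)
    have hc : c = [] := List.eq_nil_of_length_eq_zero (by omega)
    subst hf; subst hc; simp [pvMixB]
  | succ n ih =>
    intro f c acc h
    rw [List.range_succ_eq_map, List.foldl_cons, List.foldl_map]
    have hstep : (fun (acc : List Char) (k : Nat) =>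
          let acc := if k.succ < f.length ∧ f.getD k.succ ' ' ≠ ' ' then acc ++ [f.getD k.succ ' '] else acc
          if k.succ < c.length then acc ++ [c.getD k.succ ' '] else acc)
        = (fun (acc : List Char) (k : Nat) =>
          let acc := if k < f.tail.length ∧ f.tail.getD k ' ' ≠ ' ' then acc ++ [f.tail.getD k ' '] else acc
          if k < c.tail.length then acc ++ [c.tail.getD k ' '] else acc) := by
      funext acc k
      have h1 : (k.succ < f.length ↔ k < f.tail.length) := by
        cases f <;> simp
      have h2 : (k.succ < c.length ↔ k < c.tail.length) := by
        cases c <;> simp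
      have h3 : f.getD k.succ ' ' = f.tail.getD k ' ' := by cases f <;> simp
      have h4 : c.getD k.succ ' ' = c.tail.getD k ' ' := by cases c <;> simp
      simp only [h1, h2, h3, h4]
    rw [hstep]
    rw [ih f.tail c.tail _ (by cases f <;> cases c <;> simp_all)]
    -- head step
    cases f with
    | nil =>
      cases c with
      | nil => simp at h
      | cons b c => simp [pvMixB]
    | cons a f =>
      cases c with
      | nil => simp [pvMixB]; by_cases ha : a = ' ' <;> simp [ha]
      | cons b c =>
        simp only [List.tail_cons, pvMixB]
        by_cases ha : a = ' ' <;> simp [ha]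

-- no space occurs in the constant
theorem pv_flatten_singleton (l : List Char) : (l.map (fun c => [c])).flatten = l := by
  induction l with
  | nil => rfl
  | cons a t ih => simp [ih]

theorem pv_code_nospace : ∀ x ∈ "INFOTC4320".toList, x ≠ ' ' := by
  show ∀ x ∈ ['I','N','F','O','T','C','4','3','2','0'], x ≠ ' '
  intro x hx
  fin_cases hx <;> decide

set_option maxRecDepth 4000 in
theorem pv_altB_eq (first_name last_name row seat : String) :
    create_reservation_code_alt first_name last_name row seat
    = String.mk (pvMixB first_name.toList "INFOTC4320".toList) := by
  unfold create_reservation_code_alt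
  dsimp only
  rw [PySem.List.pyRange_one, List.foldl_map]
  have hconv : (fun (acc : List Char) (k : Nat) =>
        let acc := if (0 : Int) + (k : Int) < (first_name.toList.length : Int) ∧ PySem.List.pyGetD first_name.toList ((0 : Int) + (k : Int)) ' ' ≠ ' '
                   then acc ++ [PySem.List.pyGetD first_name.toList ((0 : Int) + (k : Int)) ' '] else acc
        if (0 : Int) + (k : Int) < ("INFOTC4320".toList.length : Int) then acc ++ [PySem.List.pyGetD "INFOTC4320".toList ((0 : Int) + (k : Int)) ' '] else acc)
      = (fun (acc : List Char) (k : Nat) =>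
          let acc := if k < first_name.toList.length ∧ first_name.toList.getD k ' ' ≠ ' '
                     then acc ++ [first_name.toList.getD k ' '] else acc
          if k < "INFOTC4320".toList.length then acc ++ ["INFOTC4320".toList.getD k ' '] else acc) := by
    funext acc k
    simp only [zero_add, PySem.List.pyGetD_natCast, Nat.cast_lt]
  rw [hconv]
  rw [pv_loopB _ _ _ _ (by omega)]
  rw [pv_join_nil_flatten]
  simp [pv_flatten_singleton]

theorem pv_portA_eq (first_name last_name row seat : String) :
    create_reservation_code first_name last_name row seat
    = String.mk (pvMixB first_name.toList "INFOTC4320".toList) := by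
  unfold create_reservation_code
  dsimp only
  set I := "INFOTC4320".toList with hI
  set f := first_name.toList with hf
  have hpad : ∀ (d : Int) (l : List Char),
      (PySem.List.pyRange 0 d 1).foldl (fun acc _ => acc ++ [' ']) l
      = l ++ List.replicate (d.toNat) ' ' := by
    intro d l
    rw [PySem.List.foldl_append_singleton_eq_map (fun _ => ' ')]
    congr 1
    rw [List.map_const', PySem.List.length_pyRange_one]
    simp
  have hIlen : I.length = 10 := by decide
  split_ifs with h1 h2
  · -- first_name shorter: pad first_name
    rw [hpad]
    have hd : ((I.length : Int) - (f.length : Int)).toNat = I.length - f.length := by omega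
    rw [hd]
    simp only [pv_join_nil_flatten]
    have hinner : ∀ t : Char × Char, ([[t.1], [t.2]] : List (List Char)).flatten = [t.1, t.2] := by
      intro t; simp
    simp only [hinner, pv_replace_filter, pv_inter_filter]
    rw [pv_padL f I (le_of_lt h1) (hI ▸ pv_code_nospace)]
  · -- first_name longer: pad the constant
    rw [hpad]
    have hd : ((f.length : Int) - (I.length : Int)).toNat = f.length - I.length := by omega
    rw [hd]
    simp only [pv_join_nil_flatten]
    have hinner : ∀ t : Char × Char, ([[t.1], [t.2]] : List (List Char)).flatten = [t.1, t.2] := by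
      intro t; simp
    simp only [hinner, pv_replace_filter, pv_inter_filter]
    rw [pv_padR I f (le_of_lt h2) (hI ▸ pv_code_nospace)]
  · -- equal length
    have heq : f.length = I.length := by omega
    simp only [pv_join_nil_flatten]
    have hinner : ∀ t : Char × Char, ([[t.1], [t.2]] : List (List Char)).flatten = [t.1, t.2] := by
      intro t; simp
    simp only [hinner, pv_replace_filter, pv_inter_filter]
    have := pv_padL f I (le_of_eq heq) (hI ▸ pv_code_nospace)
    rw [heq, Nat.sub_self, List.replicate_zero, List.append_nil] at this
    rw [this]

-- ===== VERDICT (by name: the statement is the Claim_ definition above) =====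
theorem create_reservation_code_spec : Claim_equal_create_reservation_code := by
  intro first_name last_name row seat _
  unfold Spec_create_reservation_code
  rw [pv_portA_eq, pv_altB_eq]
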